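-- pv_equiv track=rewrite | github.com/ErikOhls/vigenere-cipher | vigenere_cracker.py | group_cipher
-- ===== SOURCE A (Python) =====
-- def group_cipher(cipher, key_length):
--     """
--     Sig:    string, int ==> string[0..key_length]
--     Pre:    cipher is a string, key_length value is shorter than the value of the length of cipher
--     Post:   array containing strings, with every string being the n'th character in the string, and n being the key_length
--
--     Example:
--              group_cipher(abcdef, 3) ==> ["ad", "be", "cf"]
--              group_cipher(abcdef, 2) ==> ["ace", "bdf"]
--     """
--     group_array = []
--     group = ""
--     i = 0
--
--     for j in range(0, key_length):
--         i = j
--         while i < len(cipher):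
--             group += (cipher[i:i+1])
--             i += key_length
--
--         group_array.append(group)
--         group = ""
--
--     return group_array
-- ===== SOURCE B (Python) =====
-- def group_cipher(cipher, key_length):
--     if key_length <= 0:
--         return []
--     groups = [""] * key_length
--     for i, ch in enumerate(cipher):
--         groups[i % key_length] += ch
--     return groups
-- ===== Notes on version B (the rewrite author's own statement) =====
-- stated objective: simpler
-- what changed: Replaces key_length separate stride-scans over the cipher with a single distributing pass that appends each character to groups[i % key_length]; a guard returns [] for key_length <= 0, matching A's empty range.
import Mathlib
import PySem

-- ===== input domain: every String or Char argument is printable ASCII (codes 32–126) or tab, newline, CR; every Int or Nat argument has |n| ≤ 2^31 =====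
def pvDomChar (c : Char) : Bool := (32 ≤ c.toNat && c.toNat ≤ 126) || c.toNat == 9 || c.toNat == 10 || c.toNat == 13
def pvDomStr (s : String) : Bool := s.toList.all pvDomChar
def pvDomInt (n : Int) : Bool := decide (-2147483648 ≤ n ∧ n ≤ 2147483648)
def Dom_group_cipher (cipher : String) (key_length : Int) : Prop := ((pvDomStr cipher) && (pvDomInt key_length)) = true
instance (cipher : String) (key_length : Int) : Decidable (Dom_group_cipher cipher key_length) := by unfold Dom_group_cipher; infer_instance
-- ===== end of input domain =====

-- B replaces A's key_length separate stride-scans with one distributing pass over the cipher (simpler decomposition, same result).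

-- ===== PORT A =====
-- inner 'while i < len(cipher): group += cipher[i:i+1]; i += key_length' loop;
-- the '0 < kl' conjunct only makes the recursion total (Python never enters the loop body with kl ≤ 0,
-- since the outer 'for j in range(0, key_length)' is then empty); Python str modeled as List Char.
def strideA (chars : List Char) (kl : Int) (i : Int) (group : List Char) : List Char × Int :=
  if _h : 0 < kl ∧ i < (chars.length : Int) then
    strideA chars kl (i + kl) (group ++ PySem.List.slice chars (some i) (some (i + 1)))
  else (group, i)
termination_by ((chars.length : Int) - i).toNat
decreasing_by omega

def group_cipher (cipher : String) (key_length : Int) : List String :=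
  -- state = (group_array, group, i); for j in range(0, key_length): i = j; <while loop>; append; group = ""
  ((PySem.List.pyRange 0 key_length 1).foldl
    (fun (st : List String × List Char × Int) j =>
      (st.1 ++ [String.ofList (strideA cipher.toList key_length j st.2.1).1], [],
        (strideA cipher.toList key_length j st.2.1).2))
    ([], [], 0)).1

-- ===== PORT B =====
def group_cipher_alt (cipher : String) (key_length : Int) : List String :=
  if key_length ≤ 0 then []
  else
    -- groups = [""] * key_length; for i, ch in enumerate(cipher): groups[i % key_length] += ch
    ((PySem.List.enumerate cipher.toList 0).foldl
      (fun groups ic => groups.modify (ic.1 % key_length).toNat (fun g => g ++ [ic.2]))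
      (List.replicate key_length.toNat ([] : List Char))).map String.ofList

-- ===== PRECONDITION & SPEC =====
def Spec_group_cipher (cipher : String) (key_length : Int) (out : List String) : Prop := out = group_cipher_alt cipher key_length
instance (cipher : String) (key_length : Int) (out : List String) : Decidable (Spec_group_cipher cipher key_length out) := by unfold Spec_group_cipher; infer_instance

-- ===== CLAIM (what is proved, stated in full; the proofs are below) =====
def Claim_equal_group_cipher : Prop := ∀ (cipher : String) (key_length : Int), Dom_group_cipher cipher key_length → Spec_group_cipher cipher key_length (group_cipher cipher key_length)

-- ===== LEMMAS AND PROOFS =====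

-- the characters at indices i, i+n, i+2n, … of chars (Nat-side characterisation of both loops)
def strideL (chars : List Char) (n : Nat) (i : Nat) : List Char :=
  if _h : 0 < n ∧ i < chars.length then chars[i] :: strideL chars n (i + n) else []
termination_by chars.length - i
decreasing_by omega

theorem strideL_nil (n i : Nat) : strideL [] n i = [] := by
  rw [strideL]; simp

theorem strideL_pos (chars : List Char) (n i : Nat) (h : 0 < n ∧ i < chars.length) :
    strideL chars n i = chars[i] :: strideL chars n (i + n) := by
  rw [strideL, dif_pos h]

theorem strideL_neg (chars : List Char) (n i : Nat) (h : ¬ (0 < n ∧ i < chars.length)) :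
    strideL chars n i = [] := by
  rw [strideL, dif_neg h]

theorem strideA_fst (chars : List Char) (n : Nat) (hn : 0 < n) :
    ∀ (k i : Nat) (g : List Char), chars.length - i ≤ k →
      (strideA chars (n : Int) (i : Int) g).1 = g ++ strideL chars n i := by
  intro k
  induction k with
  | zero =>
    intro i g hk
    rw [strideA, strideL]
    have : ¬ (i < chars.length) := by omega
    simp [this]
  | succ k ih =>
    intro i g hk
    rw [strideA, strideL]
    by_cases hi : i < chars.length
    · have hc : 0 < (n : Int) ∧ (i : Int) < (chars.length : Int) := by
        constructor <;> [exact_mod_cast hn; exact_mod_cast hi]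
      have hc' : 0 < n ∧ i < chars.length := ⟨hn, hi⟩
      rw [dif_pos hc, dif_pos hc']
      have hcast : (i : Int) + (n : Int) = ((i + n : Nat) : Int) := by push_cast; ring
      have hslice : PySem.List.slice chars (some (i : Int)) (some ((i : Int) + 1)) = [chars[i]] := by
        have h1 : ((i : Int) + 1) = ((i : Int) + ((1 : Nat) : Int)) := by norm_num
        rw [h1, PySem.List.slice_natCast_add, List.drop_eq_getElem_cons hi]
        rfl
      rw [hslice, hcast, ih (i + n) (g ++ [chars[i]]) (by omega)]
      simp
    · have hc : ¬ (0 < (n : Int) ∧ (i : Int) < (chars.length : Int)) := by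
        intro ⟨_, h2⟩; exact hi (by exact_mod_cast h2)
      rw [dif_neg hc, dif_neg (by simp [hi])]
      simp

theorem foldA (chars : List Char) (kl : Int) :
    ∀ (xs : List Int) (ga : List String) (i0 : Int),
      ((xs.foldl
        (fun (st : List String × List Char × Int) j =>
          (st.1 ++ [String.ofList (strideA chars kl j st.2.1).1], [],
            (strideA chars kl j st.2.1).2))
        (ga, [], i0)).1 : List String)
      = ga ++ xs.map (fun j => String.ofList (strideA chars kl j []).1) := by
  intro xs
  induction xs with
  | nil => intro ga i0; simp
  | cons x xs ih =>
    intro ga i0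
    simp only [List.foldl_cons, List.map_cons]
    rw [ih]
    simp

-- appending one character to the scanned list extends exactly the stride that reaches index l.length
theorem strideL_append (l : List Char) (c : Char) (n : Nat) (hn : 0 < n) :
    ∀ (k i : Nat), l.length + 1 - i ≤ k →
      strideL (l ++ [c]) n i
        = strideL l n i ++ (if i ≤ l.length ∧ (l.length - i) % n = 0 then [c] else []) := by
  intro k
  induction k with
  | zero =>
    intro i hk
    rw [strideL_neg (l ++ [c]) n i (by simp; omega), strideL_neg l n i (by omega)]
    rw [if_neg (by omega)]
    rfl
  | succ k ih =>
    intro i hk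
    by_cases hi : i < l.length
    · rw [strideL_pos (l ++ [c]) n i ⟨hn, by simp; omega⟩, strideL_pos l n i ⟨hn, hi⟩]
      have hg : (l ++ [c])[i]'(by simp; omega) = l[i] := List.getElem_append_left hi
      rw [hg, ih (i + n) (by omega)]
      have hcond : (i + n ≤ l.length ∧ (l.length - (i + n)) % n = 0)
          ↔ (i ≤ l.length ∧ (l.length - i) % n = 0) := by
        constructor
        · rintro ⟨h1, h2⟩
          refine ⟨by omega, ?_⟩
          have : l.length - i = (l.length - (i + n)) + n := by omega
          rw [this, Nat.add_mod_right]
          exact h2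
        · rintro ⟨h1, h2⟩
          by_cases h3 : i + n ≤ l.length
          · refine ⟨h3, ?_⟩
            have : l.length - i = (l.length - (i + n)) + n := by omega
            rw [this, Nat.add_mod_right] at h2
            exact h2
          · exfalso
            have hlt : l.length - i < n := by omega
            have hpos : 0 < l.length - i := by omega
            rw [Nat.mod_eq_of_lt hlt] at h2
            omega
      rw [if_congr hcond rfl rfl]
      simp
    · by_cases he : i = l.length
      · subst he
        rw [strideL_pos (l ++ [c]) n l.length ⟨hn, by simp⟩]
        rw [strideL_neg (l ++ [c]) n (l.length + n) (by simp; omega)]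
        rw [strideL_neg l n l.length (by omega)]
        simp
      · rw [strideL_neg (l ++ [c]) n i (by simp; omega), strideL_neg l n i (by omega)]
        rw [if_neg (by omega)]
        rfl

-- for j < n:  j ≤ m ∧ n ∣ (m - j)  ↔  j = m % n
theorem cond_iff_mod (n j m : Nat) (_hn : 0 < n) (hj : j < n) :
    (j ≤ m ∧ (m - j) % n = 0) ↔ j = m % n := by
  constructor
  · rintro ⟨h1, h2⟩
    obtain ⟨q, hq⟩ := Nat.dvd_of_mod_eq_zero h2
    have hm : m = j + n * q := by omega
    rw [hm, Nat.add_mul_mod_self_left, Nat.mod_eq_of_lt hj]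
  · intro h
    subst h
    refine ⟨Nat.mod_le _ _, ?_⟩
    have := Nat.div_add_mod m n
    have : m - m % n = n * (m / n) := by omega
    rw [this, Nat.mul_mod_right]

theorem foldB (n : Nat) (hn : 0 < n) :
    ∀ (l : List Char),
      ((PySem.List.enumerate l 0).foldl
        (fun groups ic => groups.modify (ic.1 % (n : Int)).toNat (fun g => g ++ [ic.2]))
        (List.replicate n ([] : List Char)))
      = (List.range n).map (fun j => strideL l n j) := by
  intro l
  induction l using List.reverseRecOn with
  | nil =>
    apply List.ext_getElem
    · simp [PySem.List.enumerate]
    · intro j h1 h2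
      simp [PySem.List.enumerate, strideL_nil]
  | append_singleton l c ih =>
    rw [PySem.List.enumerate_append, List.foldl_append, ih]
    have hone : PySem.List.enumerate [c] (0 + (l.length : Int)) = [((l.length : Int), c)] := by
      simp [PySem.List.enumerate]
    rw [hone]
    simp only [List.foldl_cons, List.foldl_nil]
    have hidx : (((l.length : Int)) % (n : Int)).toNat = l.length % n := by
      have : ((l.length : Int)) % (n : Int) = ((l.length % n : Nat) : Int) := by push_cast; ring
      rw [this]; exact Int.toNat_natCast _
    rw [hidx]
    apply List.ext_getElem
    · simp
    · intro j h1 h2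
      have hjn : j < n := by simpa using h2
      rw [List.getElem_modify]
      simp only [List.getElem_map, List.getElem_range]
      rw [strideL_append l c n hn (l.length + 1) j (by omega)]
      have hmod : l.length % n < n := Nat.mod_lt _ hn
      by_cases hj : l.length % n = j
      · rw [if_pos hj]
        have : j ≤ l.length ∧ (l.length - j) % n = 0 :=
          (cond_iff_mod n j l.length hn hjn).mpr hj.symm
        rw [if_pos this]
      · rw [if_neg hj]
        have : ¬ (j ≤ l.length ∧ (l.length - j) % n = 0) := by
          intro hcontra
          exact hj ((cond_iff_mod n j l.length hn hjn).mp hcontra).symm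
        rw [if_neg this]
        simp

-- ===== VERDICT (by name: the statement is the Claim_ definition above) =====
theorem group_cipher_spec : Claim_equal_group_cipher := by
  intro cipher key_length _
  unfold Spec_group_cipher group_cipher group_cipher_alt
  by_cases hkl : key_length ≤ 0
  · rw [if_pos hkl, PySem.List.pyRange_one_eq_nil hkl]
    simp
  · rw [if_neg hkl]
    rw [not_le] at hkl
    set n : Nat := key_length.toNat with hn
    have hkn : key_length = (n : Int) := by omega
    have hnpos : 0 < n := by omega
    rw [foldA cipher.toList key_length (PySem.List.pyRange 0 key_length 1) [] 0]
    rw [hkn, foldB n hnpos cipher.toList]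
    rw [PySem.List.pyRange_one]
    have : (((n : Int)) - 0).toNat = n := by omega
    rw [this, List.map_map, List.map_map]
    apply List.map_congr_left
    intro k hk
    simp only [Function.comp_apply]
    have hk' : (0 : Int) + (k : Int) = ((k : Nat) : Int) := by ring
    rw [hk']
    rw [strideA_fst cipher.toList n hnpos (cipher.toList.length) k [] (by omega)]
    simp
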